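-- pv_equiv track=rewrite | github.com/wisemuffin/nsw-doe-data-stack-in-a-box | ERD_generation.py | filter_lines
-- ===== SOURCE A (Python) =====
-- def filter_lines(input_string):
--     # Split the input string into lines
--     lines = input_string.split("\n")
--
--     # Initialize a flag to keep track of whether we are inside curly brackets
--     inside_brackets = False
--
--     # Filter out lines based on whether they are inside or outside curly brackets
--     filtered_lines = []
--     for line in lines:
--         if "{" in line:
--             inside_brackets = True
--             filtered_lines.append(line)
--         elif "}" in line:
--             inside_brackets = False
--             filtered_lines.append(line)
--         elif not inside_brackets or "_sk" in line:
--             filtered_lines.append(line)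
--
--     # Join the filtered lines back together
--     result = "\n".join(filtered_lines)
--
--     return result
-- ===== SOURCE B (Python) =====
-- def filter_lines(input_string):
--     lines = input_string.split("\n")
--     # Pass 1: state table -- the inside_brackets value in effect BEFORE each line
--     before = []
--     state = False
--     for line in lines:
--         before.append(state)
--         if "{" in line:
--             state = True
--         elif "}" in line:
--             state = False
--     # Pass 2: stateless filter over (line, state-before) pairs
--     return "\n".join(
--         line
--         for line, st in zip(lines, before)
--         if "{" in line or "}" in line or not st or "_sk" in line
--     )
-- ===== Notes on version B (the rewrite author's own statement) =====
-- stated objective: alternative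
-- what changed: Replaces the single stateful keep/drop loop by a two-pass decomposition: first build a per-line table of the bracket state in effect before each line, then select lines with one stateless filter over (line, state) pairs.
import Mathlib
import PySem

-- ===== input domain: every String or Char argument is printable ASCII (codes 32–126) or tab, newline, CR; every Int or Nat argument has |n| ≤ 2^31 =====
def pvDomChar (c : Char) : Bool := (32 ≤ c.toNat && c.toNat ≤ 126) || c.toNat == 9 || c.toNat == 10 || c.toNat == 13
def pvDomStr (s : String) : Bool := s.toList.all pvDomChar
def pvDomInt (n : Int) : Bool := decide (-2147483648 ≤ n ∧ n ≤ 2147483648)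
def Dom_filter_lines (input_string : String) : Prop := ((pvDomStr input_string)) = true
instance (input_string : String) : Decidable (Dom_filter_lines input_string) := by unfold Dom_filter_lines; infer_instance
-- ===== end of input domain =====

-- B replaces A's single stateful keep/drop loop by a two-pass decomposition
-- (per-line state table, then a stateless filter); same cost, alternative structure.

-- ===== PORT A =====
-- A's for-loop: structural recursion carrying the inside_brackets flag.
def filterLinesLoopA : List String → Bool → List String
  | [], _ => []
  | line :: rest, inside =>
    if PySem.Str.isIn "{" line then line :: filterLinesLoopA rest true
    else if PySem.Str.isIn "}" line then line :: filterLinesLoopA rest false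
    else if !inside || PySem.Str.isIn "_sk" line then line :: filterLinesLoopA rest inside
    else filterLinesLoopA rest inside

def filter_lines (input_string : String) : String :=
  PySem.Str.join "\n" (filterLinesLoopA (((PySem.Str.split? input_string "\n").getD [])) false)

-- ===== PORT B =====
-- B pass 1: the state table (inside_brackets value BEFORE each line).
def stateTableB : List String → Bool → List Bool
  | [], _ => []
  | line :: rest, st =>
    st :: stateTableB rest
      (if PySem.Str.isIn "{" line then true
       else if PySem.Str.isIn "}" line then false
       else st)

-- B pass 2: the stateless keep predicate on a (line, state-before) pair.
def keepB (lb : String × Bool) : Bool :=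
  PySem.Str.isIn "{" lb.1 || PySem.Str.isIn "}" lb.1 || !lb.2 || PySem.Str.isIn "_sk" lb.1

def filter_lines_alt (input_string : String) : String :=
  let lines := ((PySem.Str.split? input_string "\n").getD [])
  PySem.Str.join "\n" (((lines.zip (stateTableB lines false)).filter keepB).map Prod.fst)

-- ===== PRECONDITION & SPEC =====
def Spec_filter_lines (input_string : String) (out : String) : Prop := out = filter_lines_alt input_string
instance (input_string : String) (out : String) : Decidable (Spec_filter_lines input_string out) := by unfold Spec_filter_lines; infer_instance

-- ===== CLAIM (what is proved, stated in full; the proofs are below) =====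
def Claim_equal_filter_lines : Prop := ∀ (input_string : String), Dom_filter_lines input_string → Spec_filter_lines input_string (filter_lines input_string)

-- ===== LEMMAS AND PROOFS =====

theorem zip_state_filter_eq_loop (lines : List String) (b : Bool) :
    ((lines.zip (stateTableB lines b)).filter keepB).map Prod.fst = filterLinesLoopA lines b := by
  induction lines generalizing b with
  | nil => simp [stateTableB, filterLinesLoopA]
  | cons line rest ih =>
    simp only [stateTableB, List.zip_cons_cons, List.filter_cons, filterLinesLoopA, keepB,
      PySem.Str.isIn_eq]
    by_cases h1 : PySem.Chars.isIn ['{'] line.toList = true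
    · simp [h1, ih]
    · by_cases h2 : PySem.Chars.isIn ['}'] line.toList = true
      · simp [h1, h2, ih]
      · by_cases h3 : b = false ∨ PySem.Chars.isIn ['_', 's', 'k'] line.toList = true
        · simp only [Bool.not_eq_true] at h1 h2
          simp [h1, h2, h3, ih]
        · simp only [Bool.not_eq_true] at h1 h2
          simp [h1, h2, h3, ih]

-- ===== VERDICT (by name: the statement is the Claim_ definition above) =====
theorem filter_lines_spec : Claim_equal_filter_lines := by
  intro s _
  unfold Spec_filter_lines filter_lines filter_lines_alt
  simp only [zip_state_filter_eq_loop]
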